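-- pv_equiv track=rewrite | github.com/hotchpotch/sentence-transformers | examples/sentence_transformer/evaluation/nano_eval.py | resolve_collections
-- ===== SOURCE A (Python) =====
-- from collections.abc import Iterable
--
-- COLLECTION_ALIASES: dict[str, str] = {
--     "nanobeir": "nanobeir",
--     "mnanobeir": "mnanobeir",
--     "multilingualnanobeir": "mnanobeir",
-- }
--
-- def parse_csv(value: str | None) -> list[str]:
--     if value is None:
--         return []
--     return [item.strip() for item in value.split(",") if item.strip()]
--
-- def parse_repeated_csv(values: Iterable[str] | None) -> list[str]:
--     if values is None:
--         return []
--
--     parsed: list[str] = []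
--     for value in values:
--         parsed.extend(parse_csv(value))
--
--     deduped: list[str] = []
--     seen: set[str] = set()
--     for item in parsed:
--         if item in seen:
--             continue
--         seen.add(item)
--         deduped.append(item)
--     return deduped
--
-- def resolve_collections(collection_values: Iterable[str] | None) -> list[str]:
--     raw_values = parse_repeated_csv(collection_values)
--     resolved: list[str] = []
--     for raw in raw_values:
--         normalized = COLLECTION_ALIASES.get(raw.lower())
--         if normalized is None:
--             raise ValueError(f"Unknown collection '{raw}'. Supported: NanoBEIR, MNanoBEIR, MultilingualNanoBEIR")
--         resolved.append(normalized)
--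
--     deduped: list[str] = []
--     seen: set[str] = set()
--     for value in resolved:
--         if value in seen:
--             continue
--         seen.add(value)
--         deduped.append(value)
--     return deduped
-- ===== SOURCE B (Python) =====
-- COLLECTION_ALIASES: dict[str, str] = {
--     "nanobeir": "nanobeir",
--     "mnanobeir": "mnanobeir",
--     "multilingualnanobeir": "mnanobeir",
-- }
--
-- def resolve_collections(collection_values):
--     if collection_values is None:
--         return []
--     resolved = []
--     seen = set()
--     for value in collection_values:
--         for item in value.split(","):
--             raw = item.strip()
--             if not raw:
--                 continue
--             normalized = COLLECTION_ALIASES.get(raw.lower())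
--             if normalized is None:
--                 raise ValueError(
--                     f"Unknown collection '{raw}'. Supported: NanoBEIR, MNanoBEIR, MultilingualNanoBEIR"
--                 )
--             if normalized not in seen:
--                 seen.add(normalized)
--                 resolved.append(normalized)
--     return resolved
-- ===== Notes on version B (the rewrite author's own statement) =====
-- stated objective: simpler
-- what changed: The three-pass pipeline (flatten+raw-dedup in parse_repeated_csv, then a normalize loop, then a second dedup loop over the normalized values) is replaced by one pass over the raw CSV items that normalizes each item and dedupes on the normalized value with a single seen set; the intermediate raw-dedup list is dropped because deduping on normalized values subsumes it.
import Mathlib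
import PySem

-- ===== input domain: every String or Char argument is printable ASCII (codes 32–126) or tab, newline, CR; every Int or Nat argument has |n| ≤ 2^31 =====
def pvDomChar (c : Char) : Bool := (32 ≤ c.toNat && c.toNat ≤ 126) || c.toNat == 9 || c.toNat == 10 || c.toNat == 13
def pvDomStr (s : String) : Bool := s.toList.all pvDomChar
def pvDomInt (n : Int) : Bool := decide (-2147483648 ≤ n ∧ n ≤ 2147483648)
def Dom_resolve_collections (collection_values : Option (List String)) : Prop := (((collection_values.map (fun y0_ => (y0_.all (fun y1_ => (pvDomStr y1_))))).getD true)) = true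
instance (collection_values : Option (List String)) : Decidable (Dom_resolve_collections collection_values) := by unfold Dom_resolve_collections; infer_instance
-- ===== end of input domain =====

-- B replaces A's three-pass pipeline (flatten + raw dedup, normalize loop, second dedup loop)
-- by a single pass over the raw CSV items with one seen set keyed on the normalized value.


-- ===== PORT A =====
def COLLECTION_ALIASES : PySem.Dict String String :=
  PySem.Dict.ofList [("nanobeir", "nanobeir"), ("mnanobeir", "mnanobeir"), ("multilingualnanobeir", "mnanobeir")]

-- value.split(",") — the separator is nonempty, so PySem.Str.split? always returns some
def splitComma (v : String) : List String := (PySem.Str.split? v ",").getD []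

def parse_csv (value : Option String) : List String :=
  match value with
  | none => []
  | some v => ((splitComma v).filter (fun item => PySem.Str.strip item ≠ "")).map PySem.Str.strip

def parse_repeated_csv (values : Option (List String)) : List String :=
  match values with
  | none => []
  | some vs =>
    let parsed : List String := vs.foldl (fun acc value => acc ++ parse_csv (some value)) []
    (parsed.foldl
      (fun (st : PySem.Set String × List String) item =>
        if PySem.Set.contains st.1 item then st
        else (PySem.Set.add st.1 item, st.2 ++ [item]))
      ((PySem.Set.empty : PySem.Set String), [])).2

def resolve_collections (collection_values : Option (List String)) : List String :=
  let raw_values := parse_repeated_csv collection_values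
  -- Python raises ValueError when the alias lookup returns None; Pre_ excludes those inputs,
  -- so the port skips such items (unreachable under Pre_).
  let resolved : List String := raw_values.foldl
    (fun acc raw =>
      match COLLECTION_ALIASES.get? (PySem.Str.lower raw) with
      | some normalized => acc ++ [normalized]
      | none => acc) []
  (resolved.foldl
    (fun (st : PySem.Set String × List String) value =>
      if PySem.Set.contains st.1 value then st
      else (PySem.Set.add st.1 value, st.2 ++ [value]))
    ((PySem.Set.empty : PySem.Set String), [])).2

-- ===== PORT B =====
def resolve_collections_alt (collection_values : Option (List String)) : List String :=
  match collection_values with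
  | none => []
  | some vs =>
    (vs.foldl
      (fun (st : PySem.Set String × List String) value =>
        (splitComma value).foldl
          (fun (st : PySem.Set String × List String) item =>
            let raw := PySem.Str.strip item
            if raw = "" then st
            else
              match COLLECTION_ALIASES.get? (PySem.Str.lower raw) with
              | none => st  -- Python raises ValueError here; excluded by Pre_
              | some normalized =>
                if PySem.Set.contains st.1 normalized then st
                else (PySem.Set.add st.1 normalized, st.2 ++ [normalized]))
          st)
      ((PySem.Set.empty : PySem.Set String), [])).2

-- ===== PRECONDITION & SPEC =====
-- Pre_ excludes exactly the inputs on which the Python A raises ValueError: some comma-separated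
-- item whose stripped form is nonempty and whose lowercase form is not a known collection alias.
def Pre_resolve_collections (collection_values : Option (List String)) : Prop :=
  ∀ v ∈ collection_values.getD [], ∀ item ∈ splitComma v,
    PySem.Str.strip item = "" ∨
      PySem.Str.lower (PySem.Str.strip item) ∈ (["nanobeir", "mnanobeir", "multilingualnanobeir"] : List String)
instance (collection_values : Option (List String)) : Decidable (Pre_resolve_collections collection_values) := by unfold Pre_resolve_collections; infer_instance

def pvWitness_resolve_collections : Option (List String) :=
  some ["NanoBEIR, mnanobeir", " MultilingualNanoBEIR ,, nanobeir"]

def Spec_resolve_collections (collection_values : Option (List String)) (out : List String) : Prop := out = resolve_collections_alt collection_values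
instance (collection_values : Option (List String)) (out : List String) : Decidable (Spec_resolve_collections collection_values out) := by unfold Spec_resolve_collections; infer_instance

-- ===== CLAIM (what is proved, stated in full; the proofs are below) =====
def Claim_equal_resolve_collections : Prop := ∀ (collection_values : Option (List String)), Dom_resolve_collections collection_values → Pre_resolve_collections collection_values → Spec_resolve_collections collection_values (resolve_collections collection_values)

-- ===== LEMMAS AND PROOFS =====

def nfFn (raw : String) : Option String := COLLECTION_ALIASES.get? (PySem.Str.lower raw)

def hFn (item : String) : Option String :=
  if PySem.Str.strip item = "" then none else nfFn (PySem.Str.strip item)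

-- generic "dedup with a seen set, after partial normalization g": output and final seen set
def ddOut (g : String → Option String) (seen : PySem.Set String) : List String → List String
  | [] => []
  | x :: t =>
    match g x with
    | none => ddOut g seen t
    | some n =>
      if PySem.Set.contains seen n then ddOut g seen t
      else n :: ddOut g (PySem.Set.add seen n) t

def ddSeen (g : String → Option String) (seen : PySem.Set String) : List String → PySem.Set String
  | [] => seen
  | x :: t =>
    match g x with
    | none => ddSeen g seen t
    | some n =>
      if PySem.Set.contains seen n then ddSeen g seen t
      else ddSeen g (PySem.Set.add seen n) t

theorem contains_true {s : PySem.Set String} {x : String} (h : x ∈ s) :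
    PySem.Set.contains s x = true := (PySem.Set.contains_iff s x).mpr h

theorem contains_false {s : PySem.Set String} {x : String} (h : x ∉ s) :
    ¬ (PySem.Set.contains s x = true) := fun hc => h ((PySem.Set.contains_iff s x).mp hc)

theorem ddOut_cons_none {g : String → Option String} {x : String} (hg : g x = none)
    (s : PySem.Set String) (t : List String) : ddOut g s (x :: t) = ddOut g s t := by
  simp [ddOut, hg]

theorem ddOut_cons_mem {g : String → Option String} {x n : String} {s : PySem.Set String}
    (hg : g x = some n) (h : n ∈ s) (t : List String) :
    ddOut g s (x :: t) = ddOut g s t := by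
  simp [ddOut, hg, h]

theorem ddOut_cons_not_mem {g : String → Option String} {x n : String} {s : PySem.Set String}
    (hg : g x = some n) (h : n ∉ s) (t : List String) :
    ddOut g s (x :: t) = n :: ddOut g (PySem.Set.add s n) t := by
  simp [ddOut, hg, h]

theorem ddSeen_cons_none {g : String → Option String} {x : String} (hg : g x = none)
    (s : PySem.Set String) (t : List String) : ddSeen g s (x :: t) = ddSeen g s t := by
  simp [ddSeen, hg]

theorem ddSeen_cons_mem {g : String → Option String} {x n : String} {s : PySem.Set String}
    (hg : g x = some n) (h : n ∈ s) (t : List String) :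
    ddSeen g s (x :: t) = ddSeen g s t := by
  simp [ddSeen, hg, h]

theorem ddSeen_cons_not_mem {g : String → Option String} {x n : String} {s : PySem.Set String}
    (hg : g x = some n) (h : n ∉ s) (t : List String) :
    ddSeen g s (x :: t) = ddSeen g (PySem.Set.add s n) t := by
  simp [ddSeen, hg, h]

theorem ddOut_append (g : String → Option String) (l1 l2 : List String) (s : PySem.Set String) :
    ddOut g s (l1 ++ l2) = ddOut g s l1 ++ ddOut g (ddSeen g s l1) l2 := by
  induction l1 generalizing s with
  | nil => simp [ddOut, ddSeen]
  | cons x t ih =>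
    rw [List.cons_append]
    cases hg : g x with
    | none => rw [ddOut_cons_none hg, ddOut_cons_none hg, ddSeen_cons_none hg, ih]
    | some n =>
      by_cases hc : n ∈ s
      · rw [ddOut_cons_mem hg hc, ddOut_cons_mem hg hc, ddSeen_cons_mem hg hc, ih]
      · rw [ddOut_cons_not_mem hg hc, ddOut_cons_not_mem hg hc, ddSeen_cons_not_mem hg hc, ih,
            List.cons_append]

theorem ddSeen_append (g : String → Option String) (l1 l2 : List String) (s : PySem.Set String) :
    ddSeen g s (l1 ++ l2) = ddSeen g (ddSeen g s l1) l2 := by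
  induction l1 generalizing s with
  | nil => simp [ddSeen]
  | cons x t ih =>
    rw [List.cons_append]
    cases hg : g x with
    | none => rw [ddSeen_cons_none hg, ddSeen_cons_none hg, ih]
    | some n =>
      by_cases hc : n ∈ s
      · rw [ddSeen_cons_mem hg hc, ddSeen_cons_mem hg hc, ih]
      · rw [ddSeen_cons_not_mem hg hc, ddSeen_cons_not_mem hg hc, ih]

-- A's dedup foldl loop computes (ddSeen some, acc ++ ddOut some)
theorem dedup_foldl (l : List String) (seen : PySem.Set String) (acc : List String) :
    l.foldl
      (fun (st : PySem.Set String × List String) item =>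
        if PySem.Set.contains st.1 item then st
        else (PySem.Set.add st.1 item, st.2 ++ [item]))
      (seen, acc)
    = (ddSeen some seen l, acc ++ ddOut some seen l) := by
  induction l generalizing seen acc with
  | nil => simp [ddOut, ddSeen]
  | cons x t ih =>
    rw [List.foldl_cons]
    show List.foldl _
        (if PySem.Set.contains seen x then (seen, acc)
         else (PySem.Set.add seen x, acc ++ [x])) t = _
    by_cases hc : x ∈ seen
    · rw [if_pos (contains_true hc), ih, ddOut_cons_mem rfl hc, ddSeen_cons_mem rfl hc]
    · rw [if_neg (contains_false hc), ih, ddOut_cons_not_mem rfl hc, ddSeen_cons_not_mem rfl hc,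
          List.append_assoc, List.singleton_append]

-- A's normalize foldl loop is a filterMap
theorem norm_foldl (l : List String) (acc : List String) :
    l.foldl
      (fun acc raw =>
        match COLLECTION_ALIASES.get? (PySem.Str.lower raw) with
        | some normalized => acc ++ [normalized]
        | none => acc) acc
    = acc ++ l.filterMap nfFn := by
  induction l generalizing acc with
  | nil => simp
  | cons x t ih =>
    rw [List.foldl_cons, List.filterMap_cons]
    show List.foldl _
        (match COLLECTION_ALIASES.get? (PySem.Str.lower x) with
         | some normalized => acc ++ [normalized]
         | none => acc) t = _
    cases h : COLLECTION_ALIASES.get? (PySem.Str.lower x) with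
    | none => rw [show nfFn x = none from h]; exact ih acc
    | some n =>
      rw [show nfFn x = some n from h, ih, List.append_assoc, List.singleton_append]

theorem ddOut_filterMap (g : String → Option String) (l : List String) (s : PySem.Set String) :
    ddOut some s (l.filterMap g) = ddOut g s l := by
  induction l generalizing s with
  | nil => simp [ddOut]
  | cons x t ih =>
    rw [List.filterMap_cons]
    cases hg : g x with
    | none => rw [ddOut_cons_none hg, ih]
    | some n =>
      by_cases hc : n ∈ s
      · rw [ddOut_cons_mem (g := some) rfl hc, ddOut_cons_mem hg hc, ih]
      · rw [ddOut_cons_not_mem (g := some) rfl hc, ddOut_cons_not_mem hg hc, ih]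

-- raw-level dedup does not change the normalized deduped output
theorem ddOut_dedup_elim (g : String → Option String) (l : List String)
    (s1 s2 : PySem.Set String)
    (hinv : ∀ x ∈ s1, ∀ n, g x = some n → n ∈ s2) :
    ddOut g s2 (ddOut some s1 l) = ddOut g s2 l := by
  induction l generalizing s1 s2 with
  | nil => simp [ddOut]
  | cons x t ih =>
    by_cases h1 : x ∈ s1
    · rw [ddOut_cons_mem (g := some) rfl h1]
      cases hg : g x with
      | none => rw [ddOut_cons_none hg, ih _ _ hinv]
      | some n =>
        have hn : n ∈ s2 := hinv x h1 n hg
        rw [ddOut_cons_mem hg hn, ih _ _ hinv]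
    · rw [ddOut_cons_not_mem (g := some) rfl h1]
      cases hg : g x with
      | none =>
        rw [ddOut_cons_none hg, ddOut_cons_none hg]
        exact ih (PySem.Set.add s1 x) s2 (by
          intro y hy m hm
          rcases (PySem.Set.mem_add s1 x y).mp hy with hy | rfl
          · exact hinv y hy m hm
          · rw [hg] at hm; cases hm)
      | some n =>
        by_cases h2 : n ∈ s2
        · rw [ddOut_cons_mem hg h2, ddOut_cons_mem hg h2]
          exact ih (PySem.Set.add s1 x) s2 (by
            intro y hy m hm
            rcases (PySem.Set.mem_add s1 x y).mp hy with hy | rfl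
            · exact hinv y hy m hm
            · rw [hg] at hm; cases hm; exact h2)
        · rw [ddOut_cons_not_mem hg h2, ddOut_cons_not_mem hg h2]
          congr 1
          exact ih (PySem.Set.add s1 x) (PySem.Set.add s2 n) (by
            intro y hy m hm
            rcases (PySem.Set.mem_add s1 x y).mp hy with hy | rfl
            · exact (PySem.Set.mem_add s2 n m).mpr (Or.inl (hinv y hy m hm))
            · rw [hg] at hm; cases hm
              exact (PySem.Set.mem_add _ _ _).mpr (Or.inr rfl))

-- per string: A's strip/filter preprocessing + nfFn is B's per-piece hFn
theorem ddOut_parse (P : List String) (s : PySem.Set String) :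
    ddOut nfFn s ((P.filter (fun item => PySem.Str.strip item ≠ "")).map PySem.Str.strip)
      = ddOut hFn s P := by
  induction P generalizing s with
  | nil => simp [ddOut]
  | cons p t ih =>
    by_cases hp : PySem.Str.strip p = ""
    · rw [ddOut_cons_none (show hFn p = none by simp [hFn, hp]) s t, ← ih s]
      congr 1
      simp [hp]
    · have h1 : (p :: t).filter (fun item => PySem.Str.strip item ≠ "")
          = p :: t.filter (fun item => PySem.Str.strip item ≠ "") := by simp [hp]
      rw [h1, List.map_cons]
      have hh : hFn p = nfFn (PySem.Str.strip p) := by simp [hFn, hp]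
      cases hg : nfFn (PySem.Str.strip p) with
      | none => rw [ddOut_cons_none hg, ddOut_cons_none (hh.trans hg), ih]
      | some n =>
        by_cases hc : n ∈ s
        · rw [ddOut_cons_mem hg hc, ddOut_cons_mem (hh.trans hg) hc, ih]
        · rw [ddOut_cons_not_mem hg hc, ddOut_cons_not_mem (hh.trans hg) hc, ih]

theorem ddSeen_parse (P : List String) (s : PySem.Set String) :
    ddSeen nfFn s ((P.filter (fun item => PySem.Str.strip item ≠ "")).map PySem.Str.strip)
      = ddSeen hFn s P := by
  induction P generalizing s with
  | nil => simp [ddSeen]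
  | cons p t ih =>
    by_cases hp : PySem.Str.strip p = ""
    · rw [ddSeen_cons_none (show hFn p = none by simp [hFn, hp]) s t, ← ih s]
      congr 1
      simp [hp]
    · have h1 : (p :: t).filter (fun item => PySem.Str.strip item ≠ "")
          = p :: t.filter (fun item => PySem.Str.strip item ≠ "") := by simp [hp]
      rw [h1, List.map_cons]
      have hh : hFn p = nfFn (PySem.Str.strip p) := by simp [hFn, hp]
      cases hg : nfFn (PySem.Str.strip p) with
      | none => rw [ddSeen_cons_none hg, ddSeen_cons_none (hh.trans hg), ih]
      | some n =>
        by_cases hc : n ∈ s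
        · rw [ddSeen_cons_mem hg hc, ddSeen_cons_mem (hh.trans hg) hc, ih]
        · rw [ddSeen_cons_not_mem hg hc, ddSeen_cons_not_mem (hh.trans hg) hc, ih]

-- A's flattening loop
theorem flat_foldl (vs : List String) (acc : List String) :
    vs.foldl (fun acc value => acc ++ parse_csv (some value)) acc
      = acc ++ vs.flatMap (fun v => parse_csv (some v)) := by
  induction vs generalizing acc with
  | nil => simp
  | cons v t ih => simp [ih, List.flatMap_cons]

-- B's inner loop
set_option maxHeartbeats 1600000 in
theorem b_inner (pieces : List String) (seen : PySem.Set String) (acc : List String) :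
    pieces.foldl
      (fun (st : PySem.Set String × List String) item =>
        let raw := PySem.Str.strip item
        if raw = "" then st
        else
          match COLLECTION_ALIASES.get? (PySem.Str.lower raw) with
          | none => st
          | some normalized =>
            if PySem.Set.contains st.1 normalized then st
            else (PySem.Set.add st.1 normalized, st.2 ++ [normalized]))
      (seen, acc)
    = (ddSeen hFn seen pieces, acc ++ ddOut hFn seen pieces) := by
  induction pieces generalizing seen acc with
  | nil => simp [ddOut, ddSeen]
  | cons p t ih =>
    rw [List.foldl_cons]
    simp only []
    by_cases hp : PySem.Str.strip p = ""
    · rw [if_pos hp, ih, ddOut_cons_none (show hFn p = none by simp [hFn, hp]),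
          ddSeen_cons_none (show hFn p = none by simp [hFn, hp])]
    · rw [if_neg hp]
      have hh : hFn p = nfFn (PySem.Str.strip p) := by simp [hFn, hp]
      cases hg : COLLECTION_ALIASES.get? (PySem.Str.lower (PySem.Str.strip p)) with
      | none =>
        simp only []
        rw [ih, ddOut_cons_none (hh.trans hg), ddSeen_cons_none (hh.trans hg)]
      | some n =>
        simp only []
        by_cases hc : n ∈ seen
        · rw [if_pos (contains_true hc), ih, ddOut_cons_mem (hh.trans hg) hc,
              ddSeen_cons_mem (hh.trans hg) hc]
        · rw [if_neg (contains_false hc), ih, ddOut_cons_not_mem (hh.trans hg) hc,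
              ddSeen_cons_not_mem (hh.trans hg) hc, List.append_assoc, List.singleton_append]

-- B's outer loop over the value strings
set_option maxHeartbeats 1600000 in
theorem b_outer (vs : List String) (seen : PySem.Set String) (acc : List String) :
    vs.foldl
      (fun (st : PySem.Set String × List String) value =>
        (splitComma value).foldl
          (fun (st : PySem.Set String × List String) item =>
            let raw := PySem.Str.strip item
            if raw = "" then st
            else
              match COLLECTION_ALIASES.get? (PySem.Str.lower raw) with
              | none => st
              | some normalized =>
                if PySem.Set.contains st.1 normalized then st
                else (PySem.Set.add st.1 normalized, st.2 ++ [normalized]))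
          st)
      (seen, acc)
    = (ddSeen hFn seen (vs.flatMap splitComma),
       acc ++ ddOut hFn seen (vs.flatMap splitComma)) := by
  induction vs generalizing seen acc with
  | nil => simp [ddOut, ddSeen]
  | cons v t ih =>
    rw [List.foldl_cons, List.flatMap_cons]
    simp only []
    rw [b_inner, ih, ddSeen_append, ddOut_append, List.append_assoc]

-- A's flattened parsed stream and B's flattened piece stream yield the same dedup
theorem parsed_eq (vs : List String) (s : PySem.Set String) :
    ddOut nfFn s (vs.flatMap (fun v => parse_csv (some v)))
      = ddOut hFn s (vs.flatMap splitComma) := by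
  induction vs generalizing s with
  | nil => simp [ddOut]
  | cons v t ih =>
    rw [List.flatMap_cons, List.flatMap_cons, ddOut_append, ddOut_append,
        show parse_csv (some v)
          = ((splitComma v).filter (fun item => PySem.Str.strip item ≠ "")).map PySem.Str.strip
        from rfl,
        ddOut_parse, ddSeen_parse, ih]

theorem resolve_collections_eq_alt (cv : Option (List String)) :
    resolve_collections cv = resolve_collections_alt cv := by
  cases cv with
  | none => rfl
  | some vs =>
    unfold resolve_collections resolve_collections_alt parse_repeated_csv
    simp only []
    rw [flat_foldl, List.nil_append, dedup_foldl, norm_foldl, List.nil_append, List.nil_append,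
        dedup_foldl, List.nil_append, ddOut_filterMap, b_outer, List.nil_append]
    rw [ddOut_dedup_elim nfFn _ PySem.Set.empty PySem.Set.empty
        (by intro x hx; simp [PySem.Set.empty] at hx)]
    exact parsed_eq vs PySem.Set.empty

-- ===== VERDICT (by name: the statement is the Claim_ definition above) =====
theorem resolve_collections_spec : Claim_equal_resolve_collections := by
  intro cv _ _
  unfold Spec_resolve_collections
  exact resolve_collections_eq_alt cv
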